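-- pv_equiv track=rewrite | github.com/Parthrm/practice | 2001-3000/2501-2600/2597.py | check
-- ===== SOURCE A (Python) =====
-- def check(nums:list,k:int)->bool:
--     if(len(nums)==0):
--         return False
--     if(len(nums)==1):
--         return True
--     for i in range(len(nums)-1):
--         for j in range(i+1,len(nums)):
--             if(abs(nums[i]-nums[j])==k):
--                 return False
--     return True
-- ===== SOURCE B (Python) =====
-- def check(nums: list, k: int) -> bool:
--     # Hash-set re-implementation: O(n) expected instead of A's O(n^2) pair scan.
--     if not nums:
--         return False
--     if len(nums) == 1:
--         return True
--     if k < 0: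
--         return True
--     s = set(nums)
--     if k == 0:
--         return len(s) == len(nums)
--     return all(x + k not in s for x in s)
-- ===== Notes on version B (the rewrite author's own statement) =====
-- stated objective: faster
-- what changed: Replaces A's quadratic scan over all index pairs with guards for k<0 (no pair can match), a set-size duplicate test for k==0, and a single hash-set membership sweep (x+k in set) for k>0.
import Mathlib
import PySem

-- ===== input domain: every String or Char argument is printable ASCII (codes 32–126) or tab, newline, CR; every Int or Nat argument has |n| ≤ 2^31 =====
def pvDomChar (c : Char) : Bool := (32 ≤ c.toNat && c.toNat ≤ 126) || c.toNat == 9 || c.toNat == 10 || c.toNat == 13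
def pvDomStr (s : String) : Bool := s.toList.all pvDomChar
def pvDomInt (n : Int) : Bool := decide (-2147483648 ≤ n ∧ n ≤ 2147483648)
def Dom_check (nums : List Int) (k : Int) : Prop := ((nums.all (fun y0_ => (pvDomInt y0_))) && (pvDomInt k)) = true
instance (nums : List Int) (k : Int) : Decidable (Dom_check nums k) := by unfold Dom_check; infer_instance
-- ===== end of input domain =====

-- B replaces A's quadratic all-pairs scan with a hash-set lookup of x+k (a dedup-length test for k = 0).

-- ===== PORT A =====
-- for i in range(len-1): for j in range(i+1, len): if abs(nums[i]-nums[j]) == k: return False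
def check (nums : List Int) (k : Int) : Bool :=
  if nums.length = 0 then false
  else if nums.length = 1 then true
  else if (PySem.List.pyRange 0 ((nums.length : Int) - 1) 1).any (fun i =>
            (PySem.List.pyRange (i + 1) (nums.length : Int) 1).any (fun j =>
              decide (|PySem.List.pyGetD nums i 0 - PySem.List.pyGetD nums j 0| = k)))
  then false else true

-- ===== PORT B =====
def check_alt (nums : List Int) (k : Int) : Bool :=
  if nums.length = 0 then false
  else if nums.length = 1 then true
  else if k < 0 then true
  else
    let s : PySem.Set Int := PySem.Set.ofList nums
    if k = 0 then decide (s.length = nums.length)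
    else s.all (fun x => !(PySem.Set.contains s (x + k)))

-- ===== PRECONDITION & SPEC =====
def Spec_check (nums : List Int) (k : Int) (out : Bool) : Prop := out = check_alt nums k
instance (nums : List Int) (k : Int) (out : Bool) : Decidable (Spec_check nums k out) := by unfold Spec_check; infer_instance

-- ===== CLAIM (what is proved, stated in full; the proofs are below) =====
def Claim_equal_check : Prop := ∀ (nums : List Int) (k : Int), Dom_check nums k → Spec_check nums k (check nums k)

-- ===== LEMMAS AND PROOFS =====

-- "some pair at distinct positions differs by exactly k"
def HasPair (nums : List Int) (k : Int) : Prop :=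
  ∃ i < nums.length, ∃ j < nums.length, i < j ∧ |nums.getD i 0 - nums.getD j 0| = k

theorem check_char (nums : List Int) (k : Int) (h : 2 ≤ nums.length) :
    (check nums k = true ↔ ¬ HasPair nums k) := by
  have h0 : ¬ nums.length = 0 := by omega
  have h1 : ¬ nums.length = 1 := by omega
  simp only [check, h0, h1, if_false]
  have hstep : ∀ c : Bool, (if c = true then false else true) = !c := by decide
  have key : ((PySem.List.pyRange 0 ((nums.length : Int) - 1) 1).any (fun i =>
      (PySem.List.pyRange (i + 1) (nums.length : Int) 1).any (fun j =>
        decide (|PySem.List.pyGetD nums i 0 - PySem.List.pyGetD nums j 0| = k))))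
      = true ↔ HasPair nums k := by
    simp only [List.any_eq_true, PySem.List.mem_pyRange_one, decide_eq_true_eq]
    unfold HasPair
    constructor
    · rintro ⟨i, ⟨h0i, hilt⟩, j, ⟨hji, hjlt⟩, habs⟩
      rw [PySem.List.pyGetD_of_nonneg nums 0 h0i,
          PySem.List.pyGetD_of_nonneg nums 0 (by omega : (0:Int) ≤ j)] at habs
      exact ⟨i.toNat, by omega, j.toNat, by omega, by omega, habs⟩
    · rintro ⟨i, hi, j, hj, hij, habs⟩
      refine ⟨(i : Int), ⟨by omega, by omega⟩, (j : Int), ⟨by omega, by omega⟩, ?_⟩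
      rw [PySem.List.pyGetD_of_nonneg nums 0 (by omega : (0:Int) ≤ (i:Int)),
          PySem.List.pyGetD_of_nonneg nums 0 (by omega : (0:Int) ≤ (j:Int))]
      simpa using habs
  rw [hstep, Bool.not_eq_true', ← Bool.not_eq_true, key]

theorem ofList_length_eq_iff (xs : List Int) :
    (PySem.Set.ofList xs).length = xs.length ↔ xs.Nodup := by
  constructor
  · intro h
    have hsub := List.dedup_sublist xs
    have hnd : (PySem.Set.ofList xs).Nodup := PySem.Set.nodup_ofList xs
    have htf : (PySem.Set.ofList xs).toFinset = xs.toFinset := by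
      ext y; simp [PySem.Set.mem_ofList]
    have h1 : (PySem.Set.ofList xs).length = xs.toFinset.card := by
      rw [← htf]; exact (List.toFinset_card_of_nodup hnd).symm
    have h2 : xs.toFinset.card = xs.dedup.length := List.card_toFinset xs
    have : xs.dedup.length = xs.length := by omega
    exact List.dedup_eq_self.mp (hsub.eq_of_length this)
  · intro h; rw [PySem.Set.ofList_eq_self_of_nodup xs h]

theorem hasPair_zero (nums : List Int) :
    HasPair nums 0 ↔ ¬ nums.Nodup := by
  rw [List.nodup_iff_getElem?_ne_getElem?]
  push Not
  constructor
  · rintro ⟨i, hi, j, hj, hij, habs⟩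
    rw [List.getD_eq_getElem nums 0 hi, List.getD_eq_getElem nums 0 hj] at habs
    have heq : nums[i] = nums[j] := by
      have := abs_eq_zero.mp habs; omega
    exact ⟨i, j, hij, hj, by simp [hi, hj, heq]⟩
  · rintro ⟨i, j, hij, hj, heq⟩
    have hi : i < nums.length := lt_trans hij hj
    simp [hi, hj] at heq
    refine ⟨i, hi, j, hj, hij, ?_⟩
    rw [List.getD_eq_getElem nums 0 hi, List.getD_eq_getElem nums 0 hj, heq]
    simp

theorem hasPair_pos (nums : List Int) (k : Int) (hk : 0 < k) :
    HasPair nums k ↔ ∃ x ∈ nums, x + k ∈ nums := by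
  constructor
  · rintro ⟨i, hi, j, hj, hij, habs⟩
    rw [List.getD_eq_getElem nums 0 hi, List.getD_eq_getElem nums 0 hj] at habs
    rcases abs_cases (nums[i] - nums[j]) with ⟨he, _⟩ | ⟨he, _⟩
    · exact ⟨nums[j], List.getElem_mem hj, by
        have : nums[j] + k = nums[i] := by omega
        rw [this]; exact List.getElem_mem hi⟩
    · exact ⟨nums[i], List.getElem_mem hi, by
        have : nums[i] + k = nums[j] := by omega
        rw [this]; exact List.getElem_mem hj⟩
  · rintro ⟨x, hx, hxk⟩
    rcases List.mem_iff_getElem.mp hx with ⟨i, hi, hxi⟩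
    rcases List.mem_iff_getElem.mp hxk with ⟨j, hj, hxj⟩
    have hne : i ≠ j := by
      intro h; subst h; omega
    rcases Nat.lt_or_gt_of_ne hne with hlt | hgt
    · refine ⟨i, hi, j, hj, hlt, ?_⟩
      rw [List.getD_eq_getElem nums 0 hi, List.getD_eq_getElem nums 0 hj, hxi, hxj]
      rw [show x - (x + k) = -k by ring, abs_neg, abs_of_pos hk]
    · refine ⟨j, hj, i, hi, hgt, ?_⟩
      rw [List.getD_eq_getElem nums 0 hi, List.getD_eq_getElem nums 0 hj, hxi, hxj]
      rw [show x + k - x = k by ring, abs_of_pos hk]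

theorem hasPair_neg (nums : List Int) (k : Int) (hk : k < 0) : ¬ HasPair nums k := by
  rintro ⟨i, hi, j, hj, hij, habs⟩
  have := abs_nonneg (nums.getD i 0 - nums.getD j 0)
  omega

theorem check_alt_char (nums : List Int) (k : Int) (h : 2 ≤ nums.length) :
    (check_alt nums k = true ↔ ¬ HasPair nums k) := by
  have h0 : ¬ nums.length = 0 := by omega
  have h1 : ¬ nums.length = 1 := by omega
  rcases lt_trichotomy k 0 with hk | hk | hk
  · have hnp : ¬ HasPair nums k := hasPair_neg nums k hk
    simp [check_alt, h0, h1, hk, hnp]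
  · subst hk
    simp only [check_alt, h0, h1, if_false, lt_irrefl, if_true,
      decide_eq_true_eq, ofList_length_eq_iff, hasPair_zero]
    tauto
  · have hk' : ¬ k < 0 := by omega
    have hk0 : ¬ k = 0 := by omega
    simp only [check_alt, h0, h1, hk', hk0, if_false]
    simp only [List.all_eq_true, Bool.not_eq_true',
      PySem.Set.contains_eq_listContains, List.contains_eq_mem,
      PySem.Set.mem_ofList, hasPair_pos nums k hk]
    simp

theorem check_spec_aux (nums : List Int) (k : Int) : check nums k = check_alt nums k := by
  by_cases h0 : nums.length = 0
  · unfold check check_alt; rw [if_pos h0, if_pos h0]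
  by_cases h1 : nums.length = 1
  · unfold check check_alt
    rw [if_neg h0, if_pos h1, if_neg h0, if_pos h1]
  have h : 2 ≤ nums.length := by omega
  rw [Bool.eq_iff_iff, check_char nums k h, check_alt_char nums k h]

-- ===== VERDICT (by name: the statement is the Claim_ definition above) =====
theorem check_spec : Claim_equal_check := by
  intro nums k _
  unfold Spec_check
  exact check_spec_aux nums k
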